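-- pv_equiv track=rewrite | github.com/GarrettStubbings/FHIRDifferentialComparison | MappingToolHigherLevel.py | add_dummy_parents
-- ===== SOURCE A (Python) =====
-- def add_dummy_parents(resource_dict):
--     """
--     PARAMETERS:
--     resource_dict: dictionary of dictionaries
--         Fhir resource in python dictionary form
--
--     RETURNS:
--         same dictionary with dummy (empty) elements to structure output
--     """
--     dummy_parents = []
--     for k, v in resource_dict.items():
--         for i, s in enumerate(k):
--             if s == ".":
--                 dummy_parent = k[:i]
--                 if dummy_parent not in dummy_parents and (
--                         dummy_parent not in resource_dict.keys()):
--                     dummy_parents.append(dummy_parent)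
--     for dummy_parent in dummy_parents:
--         resource_dict[dummy_parent] = {"mapping": {"identity": "CDSS5.1",
--                                                    "map": "DISPLAY ONLY"}}
--     return resource_dict
-- ===== SOURCE B (Python) =====
-- def add_dummy_parents(resource_dict):
--     pending = []
--     for k in resource_dict:
--         parts = k.split(".")
--         prefix = parts[0]
--         for part in parts[1:]:
--             if prefix not in pending and prefix not in resource_dict:
--                 pending.append(prefix)
--             prefix = prefix + "." + part
--     for p in pending:
--         resource_dict[p] = {"mapping": {"identity": "CDSS5.1",
--                                         "map": "DISPLAY ONLY"}}
--     return resource_dict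
-- ===== Notes on version B (the rewrite author's own statement) =====
-- stated objective: simpler
-- what changed: B replaces A's character-by-character scan of every key (slicing k[:i] afresh at each dot) by splitting each key on '.' once and growing a running prefix token by token, collecting each unseen non-key prefix shortest-first.
import Mathlib
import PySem

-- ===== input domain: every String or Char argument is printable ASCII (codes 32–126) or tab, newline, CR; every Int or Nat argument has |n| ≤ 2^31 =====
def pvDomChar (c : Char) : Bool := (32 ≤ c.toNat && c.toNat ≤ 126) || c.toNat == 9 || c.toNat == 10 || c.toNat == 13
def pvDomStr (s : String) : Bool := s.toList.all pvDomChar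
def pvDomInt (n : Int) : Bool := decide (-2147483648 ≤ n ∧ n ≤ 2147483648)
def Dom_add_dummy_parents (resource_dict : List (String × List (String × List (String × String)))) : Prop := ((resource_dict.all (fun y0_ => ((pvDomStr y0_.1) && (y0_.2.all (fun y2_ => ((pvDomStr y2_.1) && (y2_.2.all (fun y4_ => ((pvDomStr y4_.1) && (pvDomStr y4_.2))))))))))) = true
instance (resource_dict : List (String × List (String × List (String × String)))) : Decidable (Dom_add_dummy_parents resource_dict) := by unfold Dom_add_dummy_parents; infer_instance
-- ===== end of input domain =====

-- B replaces A's character-by-character index scan (slicing k[:i] at every dot) by a single token-level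
-- pass: split each key on '.' once and grow the running prefix by one part at a time (objective: simpler).
-- A mutates its argument dict in place; the equivalence proved here is about the RETURN value (B performs
-- the same in-place mutation in Python).

-- the dummy placeholder entry both programs insert
def pvDummyVal : List (String × List (String × String)) :=
  [("mapping", [("identity", "CDSS5.1"), ("map", "DISPLAY ONLY")])]

-- ===== PORT A =====
def add_dummy_parents (resource_dict : List (String × List (String × List (String × String)))) : List (String × List (String × List (String × String))) :=
  let dummy_parents : List String :=
    resource_dict.foldl (fun dummy_parents kv =>
      (PySem.List.enumerate kv.1.toList).foldl (fun dummy_parents is =>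
        if is.2 = '.' then
          let dummy_parent := String.ofList (PySem.List.slice kv.1.toList none (some is.1))
          if dummy_parent ∉ dummy_parents ∧ dummy_parent ∉ resource_dict.map Prod.fst
          then dummy_parents ++ [dummy_parent] else dummy_parents
        else dummy_parents) dummy_parents) []
  (dummy_parents.foldl (fun d dummy_parent => d.insert dummy_parent pvDummyVal)
    (PySem.Dict.mk resource_dict)).items

-- ===== PORT B =====
def add_dummy_parents_alt (resource_dict : List (String × List (String × List (String × String)))) : List (String × List (String × List (String × String))) :=
  let pending : List String :=
    resource_dict.foldl (fun pending kv =>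
      let parts := PySem.Chars.splitOn kv.1.toList ['.']
      (parts.tail.foldl (fun (st : List String × List Char) part =>
          (if String.ofList st.2 ∉ st.1 ∧ String.ofList st.2 ∉ resource_dict.map Prod.fst
            then st.1 ++ [String.ofList st.2] else st.1,
           st.2 ++ '.' :: part))
        (pending, parts.headD [])).1) []
  (pending.foldl (fun d p => d.insert p pvDummyVal) (PySem.Dict.mk resource_dict)).items

-- ===== PRECONDITION & SPEC =====
def Spec_add_dummy_parents (resource_dict : List (String × List (String × List (String × String)))) (out : List (String × List (String × List (String × String)))) : Prop := out = add_dummy_parents_alt resource_dict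
instance (resource_dict : List (String × List (String × List (String × String)))) (out : List (String × List (String × List (String × String)))) : Decidable (Spec_add_dummy_parents resource_dict out) := by unfold Spec_add_dummy_parents; infer_instance

-- ===== CLAIM (what is proved, stated in full; the proofs are below) =====
def Claim_equal_add_dummy_parents : Prop := ∀ (resource_dict : List (String × List (String × List (String × String)))), Dom_add_dummy_parents resource_dict → Spec_add_dummy_parents resource_dict (add_dummy_parents resource_dict)

-- ===== LEMMAS AND PROOFS =====

-- the common "collect a new candidate" step of both inner loops
def pvStep (K : List String) (dp : List String) (c : String) : List String :=
  if c ∉ dp ∧ c ∉ K then dp ++ [c] else dp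

-- the list of prefixes of cs that end just before a '.' of cs, shortest first
def pvDotPrefixes : List Char → List (List Char)
  | [] => []
  | c :: cs => (if c = '.' then [[]] else []) ++ (pvDotPrefixes cs).map (c :: ·)

-- cumulative joins: pvCum pre [p1, ..., pn] = [pre, pre.p1, ..., pre.p1.....p(n-1)] (n entries)
def pvCum : List Char → List (List Char) → List (List Char)
  | _, [] => []
  | pre, p :: ps => pre :: pvCum (pre ++ '.' :: p) ps

-- structural form of cs.split('.')
def pvSplit : List Char → List (List Char)
  | [] => [[]]
  | c :: cs => if c = '.' then [] :: pvSplit cs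
               else (c :: (pvSplit cs).headD []) :: (pvSplit cs).tail

theorem pvDotPrefixes_cons_dot (cs : List Char) :
    pvDotPrefixes ('.' :: cs) = [] :: (pvDotPrefixes cs).map ('.' :: ·) := by
  simp [pvDotPrefixes]

theorem pvDotPrefixes_cons_ne {c : Char} (cs : List Char) (hc : c ≠ '.') :
    pvDotPrefixes (c :: cs) = (pvDotPrefixes cs).map (c :: ·) := by
  simp [pvDotPrefixes, hc]

theorem pvCum_cons (pre p : List Char) (ps : List (List Char)) :
    pvCum pre (p :: ps) = pre :: pvCum (pre ++ '.' :: p) ps := rfl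

theorem pvSplit_cons_dot (cs : List Char) : pvSplit ('.' :: cs) = [] :: pvSplit cs := by
  simp [pvSplit]

theorem pvSplit_cons_ne {c : Char} (cs : List Char) (hc : c ≠ '.') :
    pvSplit (c :: cs) = (c :: (pvSplit cs).headD []) :: (pvSplit cs).tail := by
  simp [pvSplit, hc]

theorem pvSplit_ne_nil (cs : List Char) : pvSplit cs ≠ [] := by
  cases cs with
  | nil => simp [pvSplit]
  | cons c cs => by_cases hc : c = '.'
                 · subst hc; rw [pvSplit_cons_dot]; simp
                 · rw [pvSplit_cons_ne cs hc]; simp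

theorem pvSplit_head_tail (cs : List Char) :
    (pvSplit cs).headD [] :: (pvSplit cs).tail = pvSplit cs := by
  cases h : pvSplit cs with
  | nil => exact absurd h (pvSplit_ne_nil cs)
  | cons a t => rfl

theorem pv_go_eq (l : List Char) : ∀ (fuel : Nat), l.length ≤ fuel → ∀ (cur : List Char) (acc : List (List Char)),
    PySem.Chars.splitOn.go ['.'] fuel l cur acc
      = acc.reverse ++ (cur.reverse ++ (pvSplit l).headD []) :: (pvSplit l).tail := by
  induction l with
  | nil =>
    intro fuel _ cur acc
    cases fuel <;> simp [PySem.Chars.splitOn.go, pvSplit]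
  | cons c rest ih =>
    intro fuel hlen cur acc
    cases fuel with
    | zero => simp at hlen
    | succ f =>
      by_cases hc : c = '.'
      · subst hc
        rw [show PySem.Chars.splitOn.go ['.'] (f+1) ('.' :: rest) cur acc
              = PySem.Chars.splitOn.go ['.'] f rest [] (cur.reverse :: acc) by
            simp [PySem.Chars.splitOn.go, List.isPrefixOf]]
        rw [ih f (by simpa using hlen) [] (cur.reverse :: acc)]
        rw [pvSplit_cons_dot, List.headD_cons, List.tail_cons, ← pvSplit_head_tail rest]
        simp
      · rw [show PySem.Chars.splitOn.go ['.'] (f+1) (c :: rest) cur acc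
              = PySem.Chars.splitOn.go ['.'] f rest (c :: cur) acc by
            simp [PySem.Chars.splitOn.go, List.isPrefixOf, Ne.symm hc]]
        rw [ih f (by simpa using hlen) (c :: cur) acc]
        rw [pvSplit_cons_ne rest hc, List.headD_cons, List.tail_cons]
        simp

theorem pv_splitOn_eq (cs : List Char) : PySem.Chars.splitOn cs ['.'] = pvSplit cs := by
  rw [PySem.Chars.splitOn, pv_go_eq cs (cs.length + 1) (by omega) [] []]
  simp only [List.reverse_nil, List.nil_append]
  exact pvSplit_head_tail cs

theorem pv_cum_split (cs : List Char) : ∀ (pre : List Char),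
    pvCum (pre ++ (pvSplit cs).headD []) (pvSplit cs).tail
      = (pvDotPrefixes cs).map (pre ++ ·) := by
  induction cs with
  | nil => intro pre; simp [pvSplit, pvCum, pvDotPrefixes]
  | cons c cs ih =>
    intro pre
    by_cases hc : c = '.'
    · subst hc
      rw [pvSplit_cons_dot, List.headD_cons, List.tail_cons, List.append_nil,
          ← pvSplit_head_tail cs, pvCum_cons,
          List.append_cons pre '.' ((pvSplit cs).headD []),
          ih (pre ++ ['.']), pvDotPrefixes_cons_dot]
      simp [List.map_map, Function.comp_def]
    · rw [pvSplit_cons_ne cs hc, List.headD_cons, List.tail_cons,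
          List.append_cons pre c ((pvSplit cs).headD []),
          ih (pre ++ [c]), pvDotPrefixes_cons_ne cs hc]
      simp [List.map_map, Function.comp_def]

theorem pv_innerA_gen (K : List String) (cs : List Char) : ∀ (pre : List Char) (dp : List String),
    (PySem.List.enumerate cs ((pre.length : Int))).foldl (fun dp is =>
        if is.2 = '.' then pvStep K dp (String.ofList (PySem.List.slice (pre ++ cs) none (some is.1))) else dp) dp
      = ((pvDotPrefixes cs).map (fun x => String.ofList (pre ++ x))).foldl (pvStep K) dp := by
  induction cs with
  | nil => intro pre dp; simp [PySem.List.enumerate_nil, pvDotPrefixes]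
  | cons c cs ih =>
    intro pre dp
    rw [PySem.List.enumerate_cons, List.foldl_cons]
    have hcast : (pre.length : Int) + 1 = ((pre ++ [c]).length : Int) := by simp
    by_cases hc : c = '.'
    · subst hc
      rw [if_pos (show (((pre.length : Int), '.').2 = '.') from rfl)]
      rw [show PySem.List.slice (pre ++ '.' :: cs) none (some ((pre.length : Int))) = pre from by
            rw [PySem.List.slice_to_natCast]; exact List.take_left]
      rw [hcast, List.append_cons pre '.' cs, ih (pre ++ ['.']) (pvStep K dp (String.ofList pre)),
          pvDotPrefixes_cons_dot, List.map_cons, List.foldl_cons]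
      simp [List.map_map, Function.comp_def]
    · rw [if_neg (show ¬(((pre.length : Int), c).2 = '.') from hc)]
      rw [hcast, List.append_cons pre c cs, ih (pre ++ [c]) dp, pvDotPrefixes_cons_ne cs hc]
      simp [List.map_map, Function.comp_def]

-- B's inner loop collects exactly the cumulative joins
theorem pv_innerB (K : List String) (l : List (List Char)) : ∀ (pre : List Char) (dp : List String),
    (l.foldl (fun (st : List String × List Char) part =>
        (if String.ofList st.2 ∉ st.1 ∧ String.ofList st.2 ∉ K
          then st.1 ++ [String.ofList st.2] else st.1,
         st.2 ++ '.' :: part)) (dp, pre)).1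
      = ((pvCum pre l).map String.ofList).foldl (pvStep K) dp := by
  induction l with
  | nil => intro pre dp; simp [pvCum]
  | cons p ps ih =>
    intro pre dp
    rw [List.foldl_cons, pvCum_cons, List.map_cons, List.foldl_cons]
    exact ih (pre ++ '.' :: p) (pvStep K dp (String.ofList pre))

-- the two inner loops agree on every key
theorem pv_inner_eq (K : List String) (cs : List Char) (dp : List String) :
    (PySem.List.enumerate cs).foldl (fun dummy_parents is =>
        if is.2 = '.' then
          let dummy_parent := String.ofList (PySem.List.slice cs none (some is.1))
          if dummy_parent ∉ dummy_parents ∧ dummy_parent ∉ K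
          then dummy_parents ++ [dummy_parent] else dummy_parents
        else dummy_parents) dp
      = ((PySem.Chars.splitOn cs ['.']).tail.foldl (fun (st : List String × List Char) part =>
          (if String.ofList st.2 ∉ st.1 ∧ String.ofList st.2 ∉ K
            then st.1 ++ [String.ofList st.2] else st.1,
           st.2 ++ '.' :: part)) (dp, (PySem.Chars.splitOn cs ['.']).headD [])).1 := by
  have h := pv_cum_split cs []
  simp only [List.nil_append] at h
  refine ((pv_innerA_gen K cs [] dp).trans ?_).trans
    (pv_innerB K (PySem.Chars.splitOn cs ['.']).tail
      ((PySem.Chars.splitOn cs ['.']).headD []) dp).symm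
  rw [pv_splitOn_eq, h]
  simp

-- ===== VERDICT (by name: the statement is the Claim_ definition above) =====
theorem add_dummy_parents_spec : Claim_equal_add_dummy_parents := by
  intro resource_dict _
  unfold Spec_add_dummy_parents
  show add_dummy_parents resource_dict = add_dummy_parents_alt resource_dict
  unfold add_dummy_parents add_dummy_parents_alt
  have h : resource_dict.foldl (fun dummy_parents kv =>
      (PySem.List.enumerate kv.1.toList).foldl (fun dummy_parents is =>
        if is.2 = '.' then
          let dummy_parent := String.ofList (PySem.List.slice kv.1.toList none (some is.1))
          if dummy_parent ∉ dummy_parents ∧ dummy_parent ∉ resource_dict.map Prod.fst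
          then dummy_parents ++ [dummy_parent] else dummy_parents
        else dummy_parents) dummy_parents) ([] : List String)
    = resource_dict.foldl (fun pending kv =>
      let parts := PySem.Chars.splitOn kv.1.toList ['.']
      (parts.tail.foldl (fun (st : List String × List Char) part =>
          (if String.ofList st.2 ∉ st.1 ∧ String.ofList st.2 ∉ resource_dict.map Prod.fst
            then st.1 ++ [String.ofList st.2] else st.1,
           st.2 ++ '.' :: part))
        (pending, parts.headD [])).1) [] := by
    apply PySem.List.foldl_congr_mem
    intro acc kv _
    exact pv_inner_eq (resource_dict.map Prod.fst) kv.1.toList acc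
  rw [h]
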